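-- pv_equiv track=rewrite | github.com/betmma/Hyperbolic-Domain-Web-Version | tools/rewrite_goto_continue.py | next_non_empty_line_start
-- ===== SOURCE A (Python) =====
-- def next_non_empty_line_start(text: str, pos: int) -> int | None:
--     i = pos
--     if i > 0 and text[i - 1] != "\n":
--         next_break = text.find("\n", i)
--         if next_break == -1:
--             return None
--         i = next_break + 1
--     while i < len(text):
--         end = text.find("\n", i)
--         if end == -1:
--             end = len(text)
--         line = text[i:end]
--         if line.strip():
--             return i
--         i = end + 1
--     return None
-- ===== SOURCE B (Python) =====
-- def next_non_empty_line_start(text: str, pos: int) -> int | None: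
--     # Same effective-start rule as A; then split the tail ONCE on "\n".
--     # The first candidate line starts at pos itself; every later line start is an
--     # absolute position, recovered back-to-front from len(text) by subtracting
--     # suffix line lengths, keeping the leftmost non-blank one.
--     if pos > 0 and text[pos - 1] != "\n":
--         nb = text.find("\n", pos)
--         if nb == -1:
--             return None
--         pos = nb + 1
--     first, *rest = text[pos:].split("\n")
--     best = None
--     offset = len(text)
--     for line in reversed(rest):
--         offset -= len(line)
--         if line.strip():
--             best = offset
--         offset -= 1
--     if first.strip():
--         best = pos
--     return best
-- ===== Notes on version B (the rewrite author's own statement) =====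
-- stated objective: alternative
-- what changed: A scans forward with a while-loop doing a find and a slice per line; B splits the tail once on newline, treats the first line (which starts at pos) directly, and recovers the remaining absolute line starts back-to-front from len(text) by subtracting suffix lengths, keeping the leftmost non-blank one.
import Mathlib
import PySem

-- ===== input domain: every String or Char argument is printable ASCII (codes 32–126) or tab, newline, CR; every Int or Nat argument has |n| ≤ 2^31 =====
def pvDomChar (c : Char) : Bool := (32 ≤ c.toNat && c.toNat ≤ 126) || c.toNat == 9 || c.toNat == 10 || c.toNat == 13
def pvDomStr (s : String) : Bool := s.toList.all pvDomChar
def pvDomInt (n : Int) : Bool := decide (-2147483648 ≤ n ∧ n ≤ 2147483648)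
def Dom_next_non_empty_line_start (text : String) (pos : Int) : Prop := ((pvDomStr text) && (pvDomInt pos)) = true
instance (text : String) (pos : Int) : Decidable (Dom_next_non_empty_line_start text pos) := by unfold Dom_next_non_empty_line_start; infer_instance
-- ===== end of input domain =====

-- B replaces A's per-line find/slice while-loop by one split on "\n": the first line starts at pos
-- itself, later line starts are recovered back-to-front from len(text) by subtracting suffix lengths
-- (same cost; the objective is an alternative structure, not speed).

-- ===== PORT A =====
-- A's while-loop: 'while i < len(text): end = text.find("\n", i) ...' (the fuel only makes the
-- recursion total; it never runs out for the fuel s.length + 1 passed below, since i grows each step).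
def pvALoop (s : List Char) : Int → Nat → Option Int
  | _, 0 => none
  | i, fuel + 1 =>
    if i < (s.length : Int) then
      let e0 := PySem.Chars.findFrom s ['\n'] i
      let e1 := if e0 = -1 then (s.length : Int) else e0
      if PySem.Chars.strip (PySem.List.slice s (some i) (some e1)) ≠ [] then some i
      else pvALoop s (e1 + 1) fuel
    else none

def next_non_empty_line_start (text : String) (pos : Int) : Option Int :=
  let s := text.toList
  if 0 < pos ∧ PySem.List.pyGet? s (pos - 1) ≠ some '\n' then
    let next_break := PySem.Chars.findFrom s ['\n'] pos
    if next_break = -1 then none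
    else pvALoop s (next_break + 1) (s.length + 1)
  else pvALoop s pos (s.length + 1)

-- ===== PORT B =====
-- B's backward loop 'for line in reversed(rest): offset -= len(line); …; offset -= 1'
def pvBRevStep (st : Option Int × Int) (line : List Char) : Option Int × Int :=
  let offset := st.2 - line.length
  (if PySem.Chars.strip line ≠ [] then some offset else st.1, offset - 1)

-- B's body after the effective start is fixed: 'first, *rest = text[pos:].split("\n"); …'
def pvBBody (s : List Char) (pos : Int) : Option Int :=
  match PySem.Chars.splitOn (PySem.List.slice s (some pos) none) ['\n'] with
  | [] => none  -- unreachable: str.split never returns an empty list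
  | first :: rest =>
    let st := rest.reverse.foldl pvBRevStep (none, (s.length : Int))
    if PySem.Chars.strip first ≠ [] then some pos else st.1

def next_non_empty_line_start_alt (text : String) (pos : Int) : Option Int :=
  let s := text.toList
  if 0 < pos ∧ PySem.List.pyGet? s (pos - 1) ≠ some '\n' then
    let nb := PySem.Chars.findFrom s ['\n'] pos
    if nb = -1 then none
    else pvBBody s (nb + 1)
  else pvBBody s pos

-- ===== PRECONDITION & SPEC =====
-- Pre_ excludes exactly pos > len(text), where the Python A raises IndexError on text[pos - 1]
-- (B raises there too); every input on which A returns normally is admitted.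
def Pre_next_non_empty_line_start (text : String) (pos : Int) : Prop :=
  pos ≤ (text.toList.length : Int)
instance (text : String) (pos : Int) : Decidable (Pre_next_non_empty_line_start text pos) := by
  unfold Pre_next_non_empty_line_start; infer_instance

def pvWitness_next_non_empty_line_start : String × Int := ("a\n \nb c", 2)

def Spec_next_non_empty_line_start (text : String) (pos : Int) (out : Option Int) : Prop :=
  out = next_non_empty_line_start_alt text pos
instance (text : String) (pos : Int) (out : Option Int) : Decidable (Spec_next_non_empty_line_start text pos out) := by
  unfold Spec_next_non_empty_line_start; infer_instance

-- ===== CLAIM (what is proved, stated in full; the proofs are below) =====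
def Claim_equal_next_non_empty_line_start : Prop :=
  ∀ (text : String) (pos : Int), Dom_next_non_empty_line_start text pos →
    Pre_next_non_empty_line_start text pos →
    Spec_next_non_empty_line_start text pos (next_non_empty_line_start text pos)

-- ===== LEMMAS AND PROOFS =====

-- forward first-match scan over lines with explicit start offsets (proof-side device)
def pvFwdScan : Int → List (List Char) → Option Int
  | _, [] => none
  | offset, line :: rest =>
    if PySem.Chars.strip line ≠ [] then some offset
    else pvFwdScan (offset + line.length + 1) rest

-- structural characterisation of splitting on '\n'
def pvConsHead (pre : List Char) : List (List Char) → List (List Char)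
  | [] => [pre]
  | h :: t => (pre ++ h) :: t

def pvSplitNL : List Char → List (List Char)
  | [] => [[]]
  | c :: l => if c = '\n' then [] :: pvSplitNL l else pvConsHead [c] (pvSplitNL l)

theorem pvSplitNL_ne_nil (d : List Char) : pvSplitNL d ≠ [] := by
  cases d with
  | nil => simp [pvSplitNL]
  | cons c l =>
    simp only [pvSplitNL]
    split_ifs
    · simp
    · cases h : pvSplitNL l <;> simp [pvConsHead]

theorem pvConsHead_consHead (a b : List Char) (xs : List (List Char)) :
    pvConsHead a (pvConsHead b xs) = pvConsHead (a ++ b) xs := by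
  cases xs <;> simp [pvConsHead]

theorem pvConsHead_nil (xs : List (List Char)) (h : xs ≠ []) : pvConsHead [] xs = xs := by
  cases xs with
  | nil => exact absurd rfl h
  | cons y ys => simp [pvConsHead]

theorem pvGo_spec : ∀ (fuel : Nat) (l cur : List Char) (accL : List (List Char)),
    l.length < fuel →
    PySem.Chars.splitOn.go ['\n'] fuel l cur accL =
      accL.reverse ++ pvConsHead cur.reverse (pvSplitNL l) := by
  intro fuel
  induction fuel with
  | zero => intro l cur accL h; omega
  | succ n ih =>
    intro l cur accL h
    cases l with
    | nil =>
      simp [PySem.Chars.splitOn.go, pvSplitNL, pvConsHead]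
    | cons c rest =>
      by_cases hc : c = '\n'
      · subst hc
        have hpre : List.isPrefixOf ['\n'] ('\n' :: rest) = true := by
          simp [List.isPrefixOf]
        rw [PySem.Chars.splitOn.go]
        simp only [hpre, if_pos]
        rw [ih _ _ _ (by simpa using Nat.lt_of_succ_lt_succ h)]
        simp [pvSplitNL, pvConsHead_nil _ (pvSplitNL_ne_nil rest)]
        cases hsp : pvSplitNL rest with
        | nil => exact absurd hsp (pvSplitNL_ne_nil rest)
        | cons x xs => simp [pvConsHead]
      · have hpre : List.isPrefixOf ['\n'] (c :: rest) = false := by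
          simp [List.isPrefixOf]
          intro hh; exact absurd hh.symm hc
        rw [PySem.Chars.splitOn.go]
        simp only [hpre]
        rw [if_neg (by simp)]
        rw [ih _ _ _ (by simpa using Nat.lt_of_succ_lt_succ h)]
        simp only [pvSplitNL, if_neg hc, pvConsHead_consHead, List.reverse_cons]

theorem pvSplitOn_eq (d : List Char) : PySem.Chars.splitOn d ['\n'] = pvSplitNL d := by
  unfold PySem.Chars.splitOn
  rw [pvGo_spec (d.length + 1) d [] [] (by omega)]
  simp [pvConsHead_nil _ (pvSplitNL_ne_nil d)]

theorem pvInfix_singleton (c : Char) (d : List Char) : [c] <:+: d ↔ c ∈ d := by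
  constructor
  · intro h
    exact (List.singleton_sublist).mp h.sublist
  · intro h
    obtain ⟨s, t, rfl⟩ := List.append_of_mem h
    exact ⟨s, t, by simp⟩

theorem pvSplitNL_of_not_mem (d : List Char) (h : '\n' ∉ d) : pvSplitNL d = [d] := by
  induction d with
  | nil => rfl
  | cons c l ih =>
    simp only [List.mem_cons, not_or] at h
    simp only [pvSplitNL, if_neg (Ne.symm h.1)]
    rw [ih h.2]
    simp [pvConsHead]

theorem pvSplitNL_append (pre rest : List Char) (h : '\n' ∉ pre) :
    pvSplitNL (pre ++ '\n' :: rest) = pre :: pvSplitNL rest := by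
  induction pre with
  | nil => simp [pvSplitNL]
  | cons c l ih =>
    simp only [List.mem_cons, not_or] at h
    simp only [List.cons_append, pvSplitNL, if_neg (Ne.symm h.1)]
    rw [ih h.2]
    simp [pvConsHead]

-- the first '\n' of d decomposes d
theorem pvFind_decomp (d : List Char) (h : 0 ≤ PySem.Chars.find d ['\n']) :
    (PySem.Chars.find d ['\n']).toNat < d.length ∧
    d = d.take (PySem.Chars.find d ['\n']).toNat ++
        '\n' :: d.drop ((PySem.Chars.find d ['\n']).toNat + 1) ∧
    '\n' ∉ d.take (PySem.Chars.find d ['\n']).toNat := by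
  obtain ⟨hpre, hmin⟩ := PySem.Chars.find_spec (s := d) (sub := ['\n']) h
  set r := (PySem.Chars.find d ['\n']).toNat with hr
  obtain ⟨t, ht⟩ := hpre
  have hdrop : d.drop r = '\n' :: t := by simpa using ht.symm
  have hlt : r < d.length := by
    by_contra hge
    rw [List.drop_eq_nil_of_le (by omega)] at hdrop
    exact (List.cons_ne_nil _ _) hdrop.symm
  refine ⟨hlt, ?_, ?_⟩
  · conv_lhs => rw [← List.take_append_drop r d]
    rw [hdrop]
    have : d.drop (r + 1) = t := by
      rw [← List.drop_drop, hdrop]; simp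
    rw [this]
  · intro hmem
    obtain ⟨i, hi, hget⟩ := List.mem_iff_getElem.mp hmem
    have hil : i < r := by
      have hh := hi; simp at hh; omega
    have hgetd : d[i]'(by omega) = '\n' := by
      rw [List.getElem_take] at hget; exact hget
    have : ['\n'] <+: d.drop i := by
      rw [List.drop_eq_getElem_cons (by omega), hgetd]
      exact ⟨d.drop (i + 1), rfl⟩
    exact hmin i hil this

theorem pvALoop_ge (s : List Char) (i : Int) (fuel : Nat) (h : (s.length : Int) ≤ i) :
    pvALoop s i fuel = none := by
  cases fuel with
  | zero => rfl
  | succ n => simp only [pvALoop]; rw [if_neg (by omega)]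

-- core: A's loop started at an absolute line start equals the forward scan of the split tail
theorem pvLoop_eq_scan : ∀ (fuel : Nat) (s d : List Char) (start : Nat),
    s.drop start = d → start ≤ s.length → d.length < fuel →
    pvALoop s (start : Int) fuel = pvFwdScan (start : Int) (pvSplitNL d) := by
  intro fuel
  induction fuel with
  | zero => intro s d start _ _ h; omega
  | succ n ih =>
    intro s d start hd hs h
    by_cases hend : start = s.length
    · have hdnil : d = [] := by subst hend; simpa using hd.symm
      subst hdnil
      simp only [pvALoop]
      rw [if_neg (by omega)]
      simp [pvSplitNL, pvFwdScan, PySem.Chars.strip, PySem.Chars.lstrip, PySem.Chars.rstrip]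
    · have hlt : start < s.length := lt_of_le_of_ne hs hend
      have hdlen : d.length = s.length - start := by rw [← hd]; rw [List.length_drop]
      simp only [pvALoop]
      rw [if_pos (by exact_mod_cast hlt)]
      rw [PySem.Chars.findFrom_natCast s ['\n'] start hs, hd]
      by_cases hf : PySem.Chars.find d ['\n'] = -1
      · -- no newline left: the tail is a single line
        simp only [hf, reduceIte]
        have hline : PySem.List.slice s (some (start : Int)) (some (s.length : Int)) = d := by
          rw [PySem.List.slice_toNat s (by positivity) (by positivity),
            Int.toNat_natCast, Int.toNat_natCast, ← hd]
          exact List.take_of_length_le (by rw [List.length_drop])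
        rw [hline]
        have hnmem : '\n' ∉ d := by
          have := (PySem.Chars.find_eq_neg_one_iff (s := d) (sub := ['\n'])).mp hf
          rw [pvInfix_singleton] at this; exact this
        rw [pvSplitNL_of_not_mem d hnmem]
        simp only [pvFwdScan]
        split_ifs with hstrip
        all_goals try rfl
        exact pvALoop_ge s _ n (by omega)
      · -- a newline at relative index r: the tail is (take r d) ++ '\n' :: rest
        have hfge : 0 ≤ PySem.Chars.find d ['\n'] := by
          have := PySem.Chars.neg_one_le_find (s := d) (sub := ['\n'])
          omega
        obtain ⟨hrlen, hdec, hnpre⟩ := pvFind_decomp d hfge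
        obtain ⟨r, hr⟩ : ∃ r : Nat, PySem.Chars.find d ['\n'] = (r : Int) :=
          ⟨(PySem.Chars.find d ['\n']).toNat, by omega⟩
        rw [hr] at hrlen hdec hnpre ⊢
        rw [Int.toNat_natCast] at hrlen hdec hnpre
        rw [if_neg (by omega : ¬((r : Int) = -1))]
        rw [if_neg (by omega : ¬((start : Int) + (r : Int) = -1))]
        have hsum : (start : Int) + (r : Int) = ((start + r : Nat) : Int) := by push_cast; ring
        have hline : PySem.List.slice s (some (start : Int)) (some ((start + r : Nat) : Int))
            = d.take r := by
          rw [PySem.List.slice_toNat s (by positivity) (by positivity),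
            Int.toNat_natCast, Int.toNat_natCast, hd]
          congr 1
          omega
        rw [hsum, hline]
        conv_rhs => rw [hdec]
        rw [pvSplitNL_append _ _ hnpre]
        simp only [pvFwdScan]
        split_ifs with hstrip
        all_goals try rfl
        have hTake : (List.take r d).length = r := by rw [List.length_take]; omega
        have h1 : ((start + r : Nat) : Int) + 1 = ((start + r + 1 : Nat) : Int) := by push_cast; ring
        have h2 : (start : Int) + ((List.take r d).length : Int) + 1
            = ((start + r + 1 : Nat) : Int) := by rw [hTake]; push_cast; ring
        rw [h1, h2]
        have e : start + (r + 1) = start + r + 1 := by omega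
        have hdrop' : s.drop (start + r + 1) = d.drop (r + 1) := by
          rw [← hd, List.drop_drop, e]
        exact ih s (d.drop (r + 1)) (start + r + 1) hdrop' (by omega)
          (by rw [List.length_drop]; omega)


-- total length of lines joined back with one separator each
def pvJoinLen (ls : List (List Char)) : Nat := (ls.map (fun l => l.length + 1)).sum

theorem pvJoinLen_splitNL (cs : List Char) : pvJoinLen (pvSplitNL cs) = cs.length + 1 := by
  induction cs with
  | nil => rfl
  | cons c l ih =>
    by_cases hc : c = '\n'
    · simp only [pvSplitNL, if_pos hc, pvJoinLen] at ih ⊢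
      simp at ih ⊢
      omega
    · simp only [pvSplitNL, if_neg hc]
      cases hsp : pvSplitNL l with
      | nil => exact absurd hsp (pvSplitNL_ne_nil l)
      | cons h t =>
        rw [hsp] at ih
        simp only [pvConsHead, pvJoinLen, List.map_cons, List.sum_cons] at ih ⊢
        simp at ih ⊢
        omega

-- B's backward fold computes the forward first-match scan (and the final offset)
theorem pvBwd_spec (rest : List (List Char)) (n : Int) :
    rest.reverse.foldl pvBRevStep (none, n)
      = (pvFwdScan (n - pvJoinLen rest + 1) rest, n - pvJoinLen rest) := by
  induction rest generalizing n with
  | nil => simp [pvFwdScan, pvJoinLen]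
  | cons a t ih =>
    rw [List.reverse_cons, List.foldl_append, ih n]
    have hS : (pvJoinLen (a :: t) : Int) = (pvJoinLen t : Int) + a.length + 1 := by
      simp only [pvJoinLen, List.map_cons, List.sum_cons]
      push_cast; ring
    simp only [List.foldl_cons, List.foldl_nil, pvBRevStep, pvFwdScan]
    have e1 : n - (pvJoinLen t : Int) - (a.length : Int)
        = n - (pvJoinLen (a :: t) : Int) + 1 := by rw [hS]; ring
    have e2 : n - (pvJoinLen t : Int) - (a.length : Int) - 1
        = n - (pvJoinLen (a :: t) : Int) := by rw [hS]; ring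
    have e3 : n - (pvJoinLen (a :: t) : Int) + 1 + (a.length : Int) + 1
        = n - (pvJoinLen t : Int) + 1 := by rw [hS]; ring
    rw [e1, e3]
    have e4 : n - (pvJoinLen (a :: t) : Int) + 1 - 1 = n - (pvJoinLen (a :: t) : Int) := by ring
    rw [e4]

-- findFrom with an arbitrary (possibly negative) start ≤ len, in terms of the clamped start
theorem pvFindFrom_eff (s sub : List Char) (pos : Int) (h : pos ≤ (s.length : Int)) :
    PySem.Chars.findFrom s sub pos none =
      if PySem.Chars.find (s.drop (PySem.List.clampIdx s.length pos)) sub = -1 then -1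
      else ((PySem.List.clampIdx s.length pos : Nat) : Int) +
        PySem.Chars.find (s.drop (PySem.List.clampIdx s.length pos)) sub := by
  have hst : (if pos < 0 then if pos + (s.length : Int) < 0 then 0 else pos + s.length else pos)
      = ((PySem.List.clampIdx s.length pos : Nat) : Int) := by
    unfold PySem.List.clampIdx
    split_ifs <;> omega
  unfold PySem.Chars.findFrom
  simp only
  rw [hst]
  rw [if_neg (by have := PySem.List.clampIdx_le s.length pos; omega)]
  rw [Int.toNat_natCast, Int.toNat_natCast, List.take_length]

-- the slice s[pos:b] for possibly negative pos (definitional form)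
theorem pvSlice_def (s : List Char) (a b : Int) :
    PySem.List.slice s (some a) (some b)
      = List.take (PySem.List.clampIdx s.length b - PySem.List.clampIdx s.length a)
          (List.drop (PySem.List.clampIdx s.length a) s) := rfl

-- A's loop for any start pos ≤ len equals B's body
theorem pvEntry (s : List Char) (pos : Int) (h : pos ≤ (s.length : Int)) :
    pvALoop s pos (s.length + 1) = pvBBody s pos := by
  unfold pvBBody
  rw [PySem.List.slice_some_none, pvSplitOn_eq]
  set eff := PySem.List.clampIdx s.length pos with heffdef
  have heff : eff ≤ s.length := PySem.List.clampIdx_le s.length pos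
  by_cases hpn : pos = (s.length : Int)
  · have heffn : eff = s.length := by
      rw [heffdef, hpn]; rw [PySem.List.clampIdx_natCast]; omega
    rw [heffn, List.drop_length]
    simp only [pvALoop]
    rw [if_neg (by omega)]
    simp [pvSplitNL, PySem.Chars.strip, PySem.Chars.lstrip, PySem.Chars.rstrip]
  · have hlt : pos < (s.length : Int) := lt_of_le_of_ne h hpn
    simp only [pvALoop]
    rw [if_pos hlt]
    rw [pvFindFrom_eff s ['\n'] pos h, ← heffdef]
    set d := s.drop eff with hd
    have hdlen : d.length = s.length - eff := by rw [hd, List.length_drop]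
    by_cases hf : PySem.Chars.find d ['\n'] = -1
    · -- no newline from the effective start: a single line
      simp only [hf, reduceIte]
      have hline : PySem.List.slice s (some pos) (some (s.length : Int)) = d := by
        rw [pvSlice_def, PySem.List.clampIdx_natCast, ← heffdef]
        have : min s.length s.length = s.length := by omega
        rw [this, hd]
        exact List.take_of_length_le (by rw [List.length_drop])
      rw [hline]
      have hnmem : '\n' ∉ d := by
        have := (PySem.Chars.find_eq_neg_one_iff (s := d) (sub := ['\n'])).mp hf
        rw [pvInfix_singleton] at this; exact this
      rw [pvSplitNL_of_not_mem d hnmem]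
      simp only [List.reverse_nil, List.foldl_nil]
      split_ifs with hstrip
      · rfl
      · exact pvALoop_ge s _ s.length (by omega)
    · -- a newline at relative index r from the effective start
      have hfge : 0 ≤ PySem.Chars.find d ['\n'] := by
        have := PySem.Chars.neg_one_le_find (s := d) (sub := ['\n'])
        omega
      obtain ⟨hrlen, hdec, hnpre⟩ := pvFind_decomp d hfge
      obtain ⟨r, hr⟩ : ∃ r : Nat, PySem.Chars.find d ['\n'] = (r : Int) :=
        ⟨(PySem.Chars.find d ['\n']).toNat, by omega⟩
      rw [hr] at hrlen hdec hnpre ⊢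
      rw [Int.toNat_natCast] at hrlen hdec hnpre
      rw [if_neg (by omega : ¬((r : Int) = -1))]
      rw [if_neg (by omega : ¬((eff : Int) + (r : Int) = -1))]
      have hline : PySem.List.slice s (some pos) (some ((eff : Int) + (r : Int))) = d.take r := by
        have hsum : (eff : Int) + (r : Int) = (((eff + r : Nat) : Nat) : Int) := by push_cast; ring
        rw [hsum, pvSlice_def, PySem.List.clampIdx_natCast, ← heffdef]
        have hmin : min (eff + r) s.length = eff + r := by omega
        rw [hmin, hd]
        congr 1
        omega
      rw [hline]
      conv_rhs => rw [hdec]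
      rw [pvSplitNL_append _ _ hnpre]
      simp only
      split_ifs with hstrip
      · rfl
      · -- both continue at the absolute start eff + r + 1
        rw [pvBwd_spec, pvJoinLen_splitNL]
        simp only
        have hlen' : (List.drop (r + 1) d).length = s.length - eff - (r + 1) := by
          rw [List.length_drop]; omega
        have hB : (s.length : Int) - (((List.drop (r + 1) d).length + 1 : Nat) : Int) + 1
            = ((eff + r + 1 : Nat) : Int) := by
          rw [hlen']; push_cast; omega
        have hA : (eff : Int) + (r : Int) + 1 = ((eff + r + 1 : Nat) : Int) := by push_cast; ring
        rw [hA, hB]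
        have hdrop' : s.drop (eff + r + 1) = d.drop (r + 1) := by
          have e : eff + (r + 1) = eff + r + 1 := by omega
          rw [hd, List.drop_drop, e]
        exact pvLoop_eq_scan s.length s (d.drop (r + 1)) (eff + r + 1) hdrop' (by omega)
          (by rw [List.length_drop]; omega)

-- ===== VERDICT (by name: the statement is the Claim_ definition above) =====
theorem next_non_empty_line_start_spec : Claim_equal_next_non_empty_line_start := by
  intro text pos _ hpre
  unfold Pre_next_non_empty_line_start at hpre
  unfold Spec_next_non_empty_line_start
  simp only [next_non_empty_line_start, next_non_empty_line_start_alt]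
  split_ifs with hc hnb
  · rfl
  · -- effective start nb + 1: the found newline is inside the text, so nb + 1 ≤ len
    rw [pvFindFrom_eff text.toList ['\n'] pos hpre] at hnb ⊢
    by_cases hfd : PySem.Chars.find (text.toList.drop (PySem.List.clampIdx text.toList.length pos)) ['\n'] = -1
    · rw [if_pos hfd] at hnb; exact absurd rfl hnb
    · rw [if_neg hfd] at hnb ⊢
      have hfge : 0 ≤ PySem.Chars.find (text.toList.drop (PySem.List.clampIdx text.toList.length pos)) ['\n'] := by
        have := PySem.Chars.neg_one_le_find
          (s := text.toList.drop (PySem.List.clampIdx text.toList.length pos)) (sub := ['\n'])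
        omega
      obtain ⟨hrlen, -, -⟩ := pvFind_decomp
        (text.toList.drop (PySem.List.clampIdx text.toList.length pos)) hfge
      have hdlen : (text.toList.drop (PySem.List.clampIdx text.toList.length pos)).length
          = text.toList.length - PySem.List.clampIdx text.toList.length pos := by
        rw [List.length_drop]
      exact pvEntry text.toList _ (by omega)
  · exact pvEntry text.toList pos hpre
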